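-- pv_equiv track=rewrite | github.com/Raksh13-gg/Challenge-2--2nd-Years | solutions/problem1.py | apply_instructions
-- ===== SOURCE A (Python) =====
-- def rotate_row(row, amt, direction):
--     if amt == 0: return row
--     n = len(row)
--     if n == 0: return row
--     amt = amt % n
--     if amt == 0: return row
--     if direction == 'RIGHT':
--         return row[-amt:] + row[:-amt]
--     else:
--
--         return row[amt:] + row[:amt]
--
-- def apply_instructions(grid, instr):
--     R = len(grid)
--
--     if any(r >= R for (r,_,_) in instr) and any(r > 0 for (r,_,_) in instr):
--         instr = [(r-1,d,a) if r-1 >= 0 else (r,d,a) for (r,d,a) in instr]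
--     for (r, d, a) in instr:
--         if 0 <= r < R:
--             grid[r] = rotate_row(grid[r], a, d)
--     return grid
-- ===== SOURCE B (Python) =====
-- def apply_instructions(grid, instr):
--     R = len(grid)
--     shift = any(r >= R for (r, _, _) in instr) and any(r > 0 for (r, _, _) in instr)
--     out = []
--     for i, row in enumerate(grid):
--         k = 0  # net LEFT rotation for row i
--         for (r, d, a) in instr:
--             rr = r - 1 if shift and r >= 1 else r
--             if rr == i:
--                 k += -a if d == 'RIGHT' else a
--         n = len(row)
--         out.append(row if n == 0 else row[k % n:] + row[:k % n])
--     return out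
-- ===== Notes on version B (the rewrite author's own statement) =====
-- stated objective: alternative
-- what changed: A folds over the instructions, slicing the targeted row once per instruction; B instead scans row by row, summing each row's net signed rotation with an integer accumulator over the instructions and slicing that row exactly once, with no renumbered instruction list and no per-instruction grid update (rotations of a row compose additively modulo its length). Equivalence is about the return value only: A mutates grid in place, B builds a new list.
import Mathlib
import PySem

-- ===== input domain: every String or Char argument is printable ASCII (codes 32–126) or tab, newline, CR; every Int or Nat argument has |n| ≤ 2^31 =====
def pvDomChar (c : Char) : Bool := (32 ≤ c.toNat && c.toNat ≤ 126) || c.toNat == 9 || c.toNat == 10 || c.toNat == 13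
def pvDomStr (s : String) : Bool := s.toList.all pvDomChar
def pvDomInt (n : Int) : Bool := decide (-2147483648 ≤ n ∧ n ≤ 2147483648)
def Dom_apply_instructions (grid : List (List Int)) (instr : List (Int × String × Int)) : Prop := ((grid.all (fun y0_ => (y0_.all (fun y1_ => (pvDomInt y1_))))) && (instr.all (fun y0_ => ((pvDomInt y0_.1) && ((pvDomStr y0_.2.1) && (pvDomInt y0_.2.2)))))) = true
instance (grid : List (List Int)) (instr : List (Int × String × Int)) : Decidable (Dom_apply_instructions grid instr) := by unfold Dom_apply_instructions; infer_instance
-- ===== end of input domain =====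

-- B replaces A's instruction-wise fold (one slice per instruction) by a row-wise scan: for
-- each row it sums the net signed rotation over the instructions and slices once (alternative
-- algorithm); the equivalence proved is about the RETURN value only: A mutates grid in place.
-- ===== PORT A =====
def rotateRow (row : List Int) (amt : Int) (direction : String) : List Int :=
  if amt = 0 then row
  else
    let n : Int := (row.length : Int)
    if n = 0 then row
    else
      let amt2 := amt % n
      if amt2 = 0 then row
      else if direction = "RIGHT" then
        PySem.List.slice row (some (-amt2)) none ++ PySem.List.slice row none (some (-amt2))
      else
        PySem.List.slice row (some amt2) none ++ PySem.List.slice row none (some amt2)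

def apply_instructions (grid : List (List Int)) (instr : List (Int × String × Int)) : List (List Int) :=
  let R : Int := (grid.length : Int)
  let instr2 :=
    if (instr.any (fun p => decide (R ≤ p.1))) && (instr.any (fun p => decide (0 < p.1))) then
      instr.map (fun p => if p.1 - 1 ≥ 0 then (p.1 - 1, p.2.1, p.2.2) else p)
    else instr
  instr2.foldl (fun g p =>
    if 0 ≤ p.1 ∧ p.1 < R then
      g.set p.1.toNat (rotateRow ((PySem.List.pyGet? g p.1).getD []) p.2.2 p.2.1)
    else g) grid

-- ===== PORT B =====
def apply_instructions_alt (grid : List (List Int)) (instr : List (Int × String × Int)) : List (List Int) :=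
  let R : Int := (grid.length : Int)
  let shift : Bool := (instr.any (fun p => decide (R ≤ p.1))) && (instr.any (fun p => decide (0 < p.1)))
  (PySem.List.enumerate grid).map (fun q =>
    let k : Int := instr.foldl (fun k p =>
      let rr := if shift && decide (1 ≤ p.1) then p.1 - 1 else p.1
      if rr = (q.1 : Int) then k + (if p.2.1 = "RIGHT" then -p.2.2 else p.2.2) else k) 0
    let n : Int := (q.2.length : Int)
    if n = 0 then q.2
    else PySem.List.slice q.2 (some (k % n)) none ++ PySem.List.slice q.2 none (some (k % n)))

-- ===== PRECONDITION & SPEC =====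
def Spec_apply_instructions (grid : List (List Int)) (instr : List (Int × String × Int)) (out : List (List Int)) : Prop := out = apply_instructions_alt grid instr
instance (grid : List (List Int)) (instr : List (Int × String × Int)) (out : List (List Int)) : Decidable (Spec_apply_instructions grid instr out) := by unfold Spec_apply_instructions; infer_instance

-- ===== CLAIM (what is proved, stated in full; the proofs are below) =====
def Claim_equal_apply_instructions : Prop := ∀ (grid : List (List Int)) (instr : List (Int × String × Int)), Dom_apply_instructions grid instr → Spec_apply_instructions grid instr (apply_instructions grid instr)

-- ===== LEMMAS AND PROOFS =====

-- net left-shift contributed to row i by the (guarded) instruction list, as in A's fold order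
def netVal (R i : Int) : List (Int × String × Int) → Int
  | [] => 0
  | p :: t =>
      (if 0 ≤ p.1 ∧ p.1 < R ∧ p.1 = i then (if p.2.1 = "RIGHT" then -p.2.2 else p.2.2) else 0)
      + netVal R i t

-- canonical left rotation (proof-side helper; both ports' slicing reduces to it)
def rotLeft (row : List Int) (k : Int) : List Int :=
  let n : Int := (row.length : Int)
  if n = 0 then row
  else
    let k2 := k % n
    PySem.List.slice row (some k2) none ++ PySem.List.slice row none (some k2)

theorem rotLeft_nil (k : Int) : rotLeft [] k = [] := by
  simp [rotLeft]

theorem rotLeft_canon (row : List Int) (k : Int) (h : row ≠ []) :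
    rotLeft row k = row.rotate ((k % (row.length : Int)).toNat) := by
  have hn : (0:Int) < (row.length : Int) := by
    have := List.length_pos_iff.mpr h; exact_mod_cast this
  have hk : 0 ≤ k % (row.length : Int) := Int.emod_nonneg _ (by omega)
  have hk2 : k % (row.length : Int) < (row.length : Int) := Int.emod_lt_of_pos _ hn
  unfold rotLeft
  simp only []
  rw [if_neg (by omega)]
  rw [PySem.List.slice_from _ hk, PySem.List.slice_to _ hk]
  rw [List.rotate_eq_drop_append_take (by omega)]

theorem rotLeft_zero (row : List Int) : rotLeft row 0 = row := by
  rcases eq_or_ne row [] with h | h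
  · simp [h, rotLeft_nil]
  · rw [rotLeft_canon row 0 h]
    have hn : (0:Int) < (row.length : Int) := by
      have := List.length_pos_iff.mpr h; exact_mod_cast this
    rw [Int.zero_emod]
    simp

theorem rotLeft_rotLeft (row : List Int) (k1 k2 : Int) :
    rotLeft (rotLeft row k1) k2 = rotLeft row (k1 + k2) := by
  rcases eq_or_ne row [] with h | h
  · simp [h, rotLeft_nil]
  · have hn : 0 < row.length := List.length_pos_iff.mpr h
    have hni : (0:Int) < (row.length : Int) := by exact_mod_cast hn
    rw [rotLeft_canon row k1 h]
    have h2 : row.rotate ((k1 % (row.length : Int)).toNat) ≠ [] := by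
      apply List.ne_nil_of_length_pos
      rw [List.length_rotate]; exact hn
    rw [rotLeft_canon _ k2 h2, rotLeft_canon row (k1 + k2) h, List.length_rotate,
        List.rotate_rotate]
    have hb1 : 0 ≤ k1 % (row.length : Int) := Int.emod_nonneg _ (ne_of_gt hni)
    have hb2 : k1 % (row.length : Int) < (row.length : Int) := Int.emod_lt_of_pos _ hni
    have hb3 : 0 ≤ k2 % (row.length : Int) := Int.emod_nonneg _ (ne_of_gt hni)
    have hb4 : k2 % (row.length : Int) < (row.length : Int) := Int.emod_lt_of_pos _ hni
    have hadd : (k1 + k2) % (row.length : Int)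
        = (k1 % (row.length : Int) + k2 % (row.length : Int)) % (row.length : Int) := by
      rw [Int.add_emod]
    by_cases hs : k1 % (row.length : Int) + k2 % (row.length : Int) < (row.length : Int)
    · have he : (k1 % (row.length : Int) + k2 % (row.length : Int)) % (row.length : Int)
          = k1 % (row.length : Int) + k2 % (row.length : Int) := Int.emod_eq_of_lt (by omega) hs
      have hab : (k1 % (row.length : Int)).toNat + (k2 % (row.length : Int)).toNat
          = ((k1 + k2) % (row.length : Int)).toNat := by omega
      rw [hab]
    · have h3 : (k1 % (row.length : Int) + k2 % (row.length : Int)) % (row.length : Int)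
          = (k1 % (row.length : Int) + k2 % (row.length : Int) - (row.length : Int)) % (row.length : Int) := by
        rw [show k1 % (row.length : Int) + k2 % (row.length : Int) - (row.length : Int)
            = (k1 % (row.length : Int) + k2 % (row.length : Int)) + (row.length : Int) * (-1) by ring,
          Int.add_mul_emod_self_left]
      have h4 : (k1 % (row.length : Int) + k2 % (row.length : Int) - (row.length : Int)) % (row.length : Int)
          = k1 % (row.length : Int) + k2 % (row.length : Int) - (row.length : Int) :=
        Int.emod_eq_of_lt (by omega) (by omega)
      have hab : (k1 % (row.length : Int)).toNat + (k2 % (row.length : Int)).toNat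
          = ((k1 + k2) % (row.length : Int)).toNat + row.length := by omega
      rw [hab]
      calc row.rotate (((k1 + k2) % (row.length : Int)).toNat + row.length)
          = (row.rotate (((k1 + k2) % (row.length : Int)).toNat)).rotate row.length :=
            (List.rotate_rotate ..).symm
        _ = (row.rotate (((k1 + k2) % (row.length : Int)).toNat)).rotate
              ((row.rotate (((k1 + k2) % (row.length : Int)).toNat)).length) := by
            rw [List.length_rotate]
        _ = row.rotate (((k1 + k2) % (row.length : Int)).toNat) := List.rotate_length _

theorem rotLeft_emod_zero (row : List Int) (m : Int) (h : m % (row.length : Int) = 0) :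
    rotLeft row m = row := by
  rcases eq_or_ne row [] with hr | hr
  · simp [hr, rotLeft_nil]
  · rw [rotLeft_canon row m hr, h]
    simp

theorem rotateRow_eq (row : List Int) (a : Int) (d : String) :
    rotateRow row a d = rotLeft row (if d = "RIGHT" then -a else a) := by
  unfold rotateRow
  simp only []
  by_cases ha : a = 0
  · subst ha
    rw [if_pos rfl]
    have : (if d = "RIGHT" then -(0:Int) else 0) = 0 := by split_ifs <;> ring
    rw [this, rotLeft_zero]
  · rw [if_neg ha]
    rcases eq_or_ne row [] with hr | hr
    · simp [hr, rotLeft_nil]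
    · have hn : 0 < row.length := List.length_pos_iff.mpr hr
      have hni : (0:Int) < (row.length : Int) := by exact_mod_cast hn
      rw [if_neg (by omega)]
      by_cases hm : a % (row.length : Int) = 0
      · rw [if_pos hm]
        have hdvd : (row.length : Int) ∣ a := Int.dvd_of_emod_eq_zero hm
        have : (if d = "RIGHT" then -a else a) % (row.length : Int) = 0 := by
          split_ifs
          · exact Int.emod_eq_zero_of_dvd (dvd_neg.mpr hdvd)
          · exact Int.emod_eq_zero_of_dvd hdvd
        rw [rotLeft_emod_zero _ _ this]
      · rw [if_neg hm]
        have hlo : 0 < a % (row.length : Int) := by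
          have := Int.emod_nonneg a (by omega : (row.length : Int) ≠ 0); omega
        have hhi : a % (row.length : Int) < (row.length : Int) := Int.emod_lt_of_pos _ hni
        by_cases hd : d = "RIGHT"
        · rw [if_pos hd, if_pos hd]
          have hneg : -(a % (row.length : Int)) = -(((a % (row.length : Int)).toNat : Int)) := by omega
          rw [hneg, PySem.List.slice_from_neg_natCast _ _ (by omega),
              PySem.List.slice_to_neg_natCast _ _ (by omega)]
          have hmod : (-a) % (row.length : Int) = (row.length : Int) - a % (row.length : Int) := by
            have hc : a % (row.length : Int) ≡ a [ZMOD (row.length : Int)] := by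
              show a % (row.length : Int) % (row.length : Int) = a % (row.length : Int)
              exact Int.emod_emod_of_dvd a dvd_rfl
            have h2 : (-(a % (row.length : Int))) % (row.length : Int) = (-a) % (row.length : Int) := hc.neg
            have h3 : (-(a % (row.length : Int))) % (row.length : Int)
                = ((row.length : Int) - a % (row.length : Int)) % (row.length : Int) := by
              rw [show (row.length : Int) - a % (row.length : Int)
                  = -(a % (row.length : Int)) + (row.length : Int) * 1 by ring,
                Int.add_mul_emod_self_left]
            have h4 : ((row.length : Int) - a % (row.length : Int)) % (row.length : Int)
                = (row.length : Int) - a % (row.length : Int) := Int.emod_eq_of_lt (by omega) (by omega)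
            omega
          rw [rotLeft_canon row (-a) hr,
              List.rotate_eq_drop_append_take (by omega)]
          have htn : ((-a) % (row.length : Int)).toNat = row.length - (a % (row.length : Int)).toNat := by
            omega
          rw [htn]
        · rw [if_neg hd, if_neg hd]
          rw [PySem.List.slice_from _ (by omega), PySem.List.slice_to _ (by omega)]
          rw [rotLeft_canon row a hr, List.rotate_eq_drop_append_take (by omega)]

theorem foldA_length (R : Int) (l : List (Int × String × Int)) (g : List (List Int)) :
    (l.foldl (fun g p =>
      if 0 ≤ p.1 ∧ p.1 < R then
        g.set p.1.toNat (rotateRow ((PySem.List.pyGet? g p.1).getD []) p.2.2 p.2.1)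
      else g) g).length = g.length := by
  induction l generalizing g with
  | nil => rfl
  | cons p t ih =>
    simp only [List.foldl_cons]
    by_cases hg : 0 ≤ p.1 ∧ p.1 < R
    · rw [if_pos hg, ih, List.length_set]
    · rw [if_neg hg, ih]

theorem foldA_getElem (R : Int) (l : List (Int × String × Int)) (g : List (List Int))
    (hR : (g.length : Int) = R) (i : Nat) (hi : i < g.length) :
    (l.foldl (fun g p =>
      if 0 ≤ p.1 ∧ p.1 < R then
        g.set p.1.toNat (rotateRow ((PySem.List.pyGet? g p.1).getD []) p.2.2 p.2.1)
      else g) g)[i]? = some (rotLeft g[i] (netVal R (i : Int) l)) := by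
  induction l generalizing g with
  | nil =>
    simp [netVal, rotLeft_zero, List.getElem?_eq_getElem hi]
  | cons p t ih =>
    simp only [List.foldl_cons, netVal]
    by_cases hg : 0 ≤ p.1 ∧ p.1 < R
    · rw [if_pos hg]
      have hlen : (g.set p.1.toNat (rotateRow ((PySem.List.pyGet? g p.1).getD []) p.2.2 p.2.1)).length = g.length :=
        List.length_set
      rw [ih _ (by rw [hlen]; exact hR) (by rw [hlen]; exact hi)]
      by_cases hpi : p.1 = (i : Int)
      · have hti : p.1.toNat = i := by omega
        have hget : (PySem.List.pyGet? g p.1).getD [] = g[i] := by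
          rw [hpi]
          rw [PySem.List.pyGet?_natCast]
          simp [List.getElem?_eq_getElem hi]
        have hset : (g.set p.1.toNat (rotateRow ((PySem.List.pyGet? g p.1).getD []) p.2.2 p.2.1))[i] =
            rotateRow g[i] p.2.2 p.2.1 := by
          simp [hti, hget]
        have hcond : 0 ≤ p.1 ∧ p.1 < R ∧ p.1 = (i : Int) := ⟨hg.1, hg.2, hpi⟩
        rw [hset, rotateRow_eq, rotLeft_rotLeft, if_pos hcond]
      · have hset : (g.set p.1.toNat (rotateRow ((PySem.List.pyGet? g p.1).getD []) p.2.2 p.2.1))[i] = g[i] := by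
          apply List.getElem_set_ne
          omega
        rw [hset, if_neg (fun h => hpi h.2.2)]
        simp
    · rw [if_neg hg, ih g hR hi, if_neg (fun h => hg ⟨h.1, h.2.1⟩)]
      simp

-- B's inner accumulator over the raw instructions equals netVal of A's renumbered list
theorem foldB_netVal (R i : Int) (hi : 0 ≤ i ∧ i < R) (shift : Bool)
    (l : List (Int × String × Int)) (acc : Int) :
    l.foldl (fun k p =>
      let rr := if shift && decide (1 ≤ p.1) then p.1 - 1 else p.1
      if rr = i then k + (if p.2.1 = "RIGHT" then -p.2.2 else p.2.2) else k) acc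
    = acc + netVal R i
        (if shift then l.map (fun p => if p.1 - 1 ≥ 0 then (p.1 - 1, p.2.1, p.2.2) else p) else l) := by
  induction l generalizing acc with
  | nil => cases shift <;> simp [netVal]
  | cons p t ih =>
    rw [List.foldl_cons, ih]
    cases shift with
    | false =>
      simp only [Bool.false_and, Bool.false_eq_true, if_false, netVal]
      by_cases hpi : p.1 = i
      · have hc : 0 ≤ p.1 ∧ p.1 < R ∧ p.1 = i := ⟨by omega, by omega, hpi⟩
        rw [if_pos hpi, if_pos hc]; ring
      · rw [if_neg hpi, if_neg (fun h => hpi h.2.2)]; ring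
    | true =>
      simp only [Bool.true_and, if_true, List.map_cons, netVal,
        decide_eq_true_eq]  -- eq_self_iff_true removed
      by_cases h1 : (1:Int) ≤ p.1
      · rw [if_pos h1, if_pos (show p.1 - 1 ≥ 0 by omega)]
        by_cases hpi : p.1 - 1 = i
        · have hc : 0 ≤ p.1 - 1 ∧ p.1 - 1 < R ∧ p.1 - 1 = i := ⟨by omega, by omega, hpi⟩
          rw [if_pos hpi]
          simp only [if_pos hc]
          ring
        · rw [if_neg hpi]
          simp only [if_neg (fun h : 0 ≤ p.1 - 1 ∧ p.1 - 1 < R ∧ p.1 - 1 = i => hpi h.2.2)]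
          ring
      · rw [if_neg h1, if_neg (show ¬ (p.1 - 1 ≥ 0) by omega)]
        by_cases hpi : p.1 = i
        · have hc : 0 ≤ p.1 ∧ p.1 < R ∧ p.1 = i := ⟨by omega, by omega, hpi⟩
          rw [if_pos hpi]
          simp only [if_pos hc]
          ring
        · rw [if_neg hpi]
          simp only [if_neg (fun h : 0 ≤ p.1 ∧ p.1 < R ∧ p.1 = i => hpi h.2.2)]
          ring

-- main equality
theorem apply_instructions_eq (grid : List (List Int)) (instr : List (Int × String × Int)) :
    apply_instructions grid instr = apply_instructions_alt grid instr := by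
  unfold apply_instructions apply_instructions_alt
  simp only []
  set R : Int := (grid.length : Int) with hR
  set shift : Bool := (instr.any (fun p => decide (R ≤ p.1))) && (instr.any (fun p => decide (0 < p.1))) with hshift
  set instr2 := if shift then instr.map (fun p => if p.1 - 1 ≥ 0 then (p.1 - 1, p.2.1, p.2.2) else p) else instr with hinstr2
  apply List.ext_getElem?
  intro n
  by_cases hn : n < grid.length
  · rw [foldA_getElem R instr2 grid hR.symm n hn]
    rw [List.getElem?_map, PySem.List.getElem?_enumerate, List.getElem?_eq_getElem hn]
    simp only [Option.map_some, Option.some.injEq, zero_add]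
    have hi : 0 ≤ ((n : Nat) : Int) ∧ ((n : Nat) : Int) < R := by
      constructor
      · omega
      · rw [hR]; exact_mod_cast hn
    rw [foldB_netVal R ((n : Nat) : Int) hi shift instr 0]
    rw [← hinstr2]
    simp only [zero_add, rotLeft]

  · rw [List.getElem?_eq_none, List.getElem?_eq_none]
    · rw [List.length_map, PySem.List.length_enumerate]; omega
    · rw [foldA_length]; omega

-- ===== VERDICT (by name: the statement is the Claim_ definition above) =====
theorem apply_instructions_spec : Claim_equal_apply_instructions := by
  intro grid instr _
  simp only [Spec_apply_instructions]
  exact apply_instructions_eq grid instr
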